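-- pv_equiv track=rewrite | github.com/saleprobe/Algorithm | Programmers/pushing_string.py | solution
-- ===== SOURCE A (Python) =====
-- def solution(A, B):
--     answer = 0
--     A = list(A)
--     B = list(B)
--     while (1):
--         if A == B:
--             return answer
--         A.insert(0, A.pop())
--         answer += 1
--         if answer >= 100:
--             return -1
--     return answer
-- ===== SOURCE B (Python) =====
-- def solution(A, B):
--     if A == B:
--         return 0
--     if len(A) != len(B):
--         return -1
--     k = (B + B).find(A)
--     return k if 0 <= k < 100 else -1
-- ===== Notes on version B (the rewrite author's own statement) =====
-- stated objective: faster
-- what changed: Replaces the up-to-100-iteration rotate-and-compare simulation on mutable lists by a single substring search of A in B+B (the classic rotation test), whose first-occurrence index is exactly the minimal right-rotation count, then applies the 100 cap.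
-- outside the precondition, e.g. on solution('', 'a'): A raises IndexError, B returns -1
-- crash fix: On A = '' with B nonempty, A raises IndexError (pop from an empty list); B returns -1. — e.g. on solution("", "a"): A raises IndexError, B returns -1
import Mathlib
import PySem

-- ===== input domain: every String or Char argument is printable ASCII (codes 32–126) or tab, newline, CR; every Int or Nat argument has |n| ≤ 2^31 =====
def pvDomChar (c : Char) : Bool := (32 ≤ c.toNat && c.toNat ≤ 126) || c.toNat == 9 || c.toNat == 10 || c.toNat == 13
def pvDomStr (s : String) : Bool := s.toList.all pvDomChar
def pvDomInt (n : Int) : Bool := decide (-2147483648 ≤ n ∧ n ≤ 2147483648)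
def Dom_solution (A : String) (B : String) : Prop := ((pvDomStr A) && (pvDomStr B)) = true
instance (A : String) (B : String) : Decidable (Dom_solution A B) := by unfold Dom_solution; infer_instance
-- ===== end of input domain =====

-- B replaces A's 100-step rotation simulation by a single substring search in B+B; return-value equivalence only (A mutates nothing observable).

-- ===== PORT A =====
-- the body of A's 'while (1)' loop; fuel only bounds the recursion (the loop itself
-- stops via the 'answer >= 100' cap, so fuel = 100 - answer never runs out)
def solGo (B : List Char) : Nat → List Char → Int → Int
  | 0, A, answer => if A = B then answer else -1
  | fuel + 1, A, answer =>
      if A = B then answer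
      else
        let A' := match PySem.List.pop? A (-1) with
                  | none => A          -- Python raises IndexError here; excluded by Pre_solution
                  | some (x, r) => x :: r   -- A.insert(0, A.pop())
        let answer' := answer + 1
        if answer' ≥ 100 then -1
        else solGo B fuel A' answer'

def solution (A : String) (B : String) : Int :=
  solGo B.toList 100 A.toList 0

-- ===== PORT B =====
def solution_alt (A : String) (B : String) : Int :=
  if A = B then 0
  else if A.length ≠ B.length then -1
  else
    let k := PySem.Str.find (B ++ B) A
    if 0 ≤ k ∧ k < 100 then k else -1

-- ===== PRECONDITION & SPEC =====
-- Pre_ excludes only A = "" with B nonempty, where A raises IndexError (pop from empty list).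
def Pre_solution (A : String) (B : String) : Prop := A = "" → B = ""
instance (A : String) (B : String) : Decidable (Pre_solution A B) := by unfold Pre_solution; infer_instance
def pvWitness_solution : String × String := ("ab", "ba")

-- On A = "" with B nonempty, A raises IndexError (pop from an empty list); B returns -1.
def Raises_solution (A : String) (B : String) : Prop := A = "" ∧ B ≠ ""
instance (A : String) (B : String) : Decidable (Raises_solution A B) := by unfold Raises_solution; infer_instance
def pvRaiseWitness_solution : String × String := ("", "a")
def pvRaiseWitnessOut_solution : Int := -1

def Spec_solution (A : String) (B : String) (out : Int) : Prop := out = solution_alt A B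
instance (A : String) (B : String) (out : Int) : Decidable (Spec_solution A B out) := by unfold Spec_solution; infer_instance

-- ===== CLAIM (what is proved, stated in full; the proofs are below) =====
def Claim_equal_solution : Prop := ∀ (A : String) (B : String), Dom_solution A B → Pre_solution A B → Spec_solution A B (solution A B)
def Claim_raises_solution : Prop := (∀ (A : String) (B : String), Dom_solution A B → Raises_solution A B → ¬ Pre_solution A B) ∧ (Dom_solution (pvRaiseWitness_solution.1) (pvRaiseWitness_solution.2) ∧ Raises_solution (pvRaiseWitness_solution.1) (pvRaiseWitness_solution.2) ∧ solution_alt (pvRaiseWitness_solution.1) (pvRaiseWitness_solution.2) = pvRaiseWitnessOut_solution)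

-- ===== LEMMAS AND PROOFS =====

-- A's rotation step: pop the last element, reinsert it at the front
def rotA (l : List Char) : List Char :=
  match PySem.List.pop? l (-1) with
  | none => l
  | some (x, r) => x :: r

theorem rotA_concat (xs : List Char) (x : Char) : rotA (xs ++ [x]) = x :: xs := by
  simp [rotA, PySem.List.pop?_last]

theorem rotA_ne_nil (l : List Char) (h : l ≠ []) : rotA l ≠ [] := by
  rcases List.eq_nil_or_concat l with rfl | ⟨xs, x, rfl⟩
  · exact absurd rfl h
  · simp [List.concat_eq_append, rotA_concat]

theorem rotA_rotate_one (l : List Char) (h : l ≠ []) : (rotA l).rotate 1 = l := by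
  rcases List.eq_nil_or_concat l with rfl | ⟨xs, x, rfl⟩
  · exact absurd rfl h
  · rw [List.concat_eq_append, rotA_concat]
    simp [List.rotate_cons_succ]

theorem rotate_one_rotA (l : List Char) (h : l ≠ []) : rotA (l.rotate 1) = l := by
  cases l with
  | nil => exact absurd rfl h
  | cons c cs =>
      have : (c :: cs).rotate 1 = cs ++ [c] := by simp [List.rotate_cons_succ]
      rw [this, rotA_concat]

theorem rotA_eq_iff (A B : List Char) (hA : A ≠ []) (j : Nat) :
    rotA A = B.rotate j ↔ A = B.rotate (j + 1) := by
  constructor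
  · intro h
    have := rotA_rotate_one A hA
    rw [h] at this
    rw [← this, List.rotate_rotate]
  · intro h
    have hB : B ≠ [] := by
      intro hb; subst hb; simp at h; exact hA h
    have hC : B.rotate j ≠ [] := by
      intro hc
      have := List.length_rotate B j
      rw [hc] at this
      exact hB (List.length_eq_zero_iff.mp this.symm)
    have : A = (B.rotate j).rotate 1 := by rw [List.rotate_rotate]; exact h
    rw [this, rotate_one_rotA _ hC]

theorem solGo_body (B : List Char) (f : Nat) (A : List Char) (answer : Int) :
    solGo B (f + 1) A answer =
      if A = B then answer
      else if answer + 1 ≥ 100 then -1 else solGo B f (rotA A) (answer + 1) := by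
  rfl

theorem solGo_none (B : List Char) :
    ∀ (f : Nat) (A : List Char), A ≠ [] → f ≤ 99 →
      (∀ j : Nat, j < f + 1 → A ≠ B.rotate j) →
      solGo B (f + 1) A (99 - (f : Int)) = -1 := by
  intro f
  induction f with
  | zero =>
      intro A hA _ hnone
      have hAB : A ≠ B := by simpa using hnone 0 (by omega)
      rw [solGo_body]
      simp [hAB]
  | succ g ih =>
      intro A hA hf hnone
      have hAB : A ≠ B := by simpa using hnone 0 (by omega)
      rw [solGo_body]
      have hcap : ¬ ((99 : Int) - ((g : Int) + 1) + 1 ≥ 100) := by omega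
      have step : (99 : Int) - ((g : Int) + 1) + 1 = 99 - (g : Int) := by ring
      simp only [hAB, if_false, Nat.cast_add, Nat.cast_one, step]
      rw [if_neg (by omega : ¬ ((99:Int) - (g:Int) ≥ 100))]
      apply ih (rotA A) (rotA_ne_nil A hA) (by omega)
      intro j hj hrot
      exact hnone (j + 1) (by omega) ((rotA_eq_iff A B hA j).mp hrot)

theorem solGo_some (B : List Char) :
    ∀ (f : Nat) (A : List Char) (j0 : Nat), A ≠ [] → f ≤ 99 →
      j0 < f + 1 → A = B.rotate j0 → (∀ i : Nat, i < j0 → A ≠ B.rotate i) →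
      solGo B (f + 1) A (99 - (f : Int)) = (99 - (f : Int)) + j0 := by
  intro f
  induction f with
  | zero =>
      intro A j0 hA _ hj0 hrot _
      interval_cases j0
      simp at hrot
      rw [solGo_body]
      simp [hrot]
  | succ g ih =>
      intro A j0 hA hf hj0 hrot hmin
      rw [solGo_body]
      cases j0 with
      | zero =>
          simp at hrot
          simp [hrot]
      | succ j =>
          have hAB : A ≠ B := by simpa using hmin 0 (by omega)
          have hcap : ¬ ((99 : Int) - ((g : Int) + 1) + 1 ≥ 100) := by omega
          have step : (99 : Int) - ((g : Int) + 1) + 1 = 99 - (g : Int) := by ring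
          simp only [hAB, if_false, Nat.cast_add, Nat.cast_one, step]
          rw [if_neg (by omega : ¬ ((99:Int) - (g:Int) ≥ 100))]
          have hrec : solGo B (g + 1) (rotA A) (99 - (g : Int)) = (99 - (g : Int)) + j := by
            apply ih (rotA A) j (rotA_ne_nil A hA) (by omega) (by omega)
            · exact (rotA_eq_iff A B hA j).mpr hrot
            · intro i hi hri
              exact hmin (i + 1) (by omega) ((rotA_eq_iff A B hA i).mp hri)
          rw [hrec]
          ring

theorem prefix_drop_iff_rotate (A B : List Char) (hlen : A.length = B.length)
    (i : Nat) (hi : i ≤ B.length) :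
    A <+: (B ++ B).drop i ↔ A = B.rotate i := by
  rw [List.drop_append_of_le_length hi, List.prefix_iff_eq_take,
      List.rotate_eq_drop_append_take hi, List.take_append]
  have h1 : (List.drop i B).length = B.length - i := by simp
  have h2 : List.take A.length (List.drop i B) = List.drop i B := by
    apply List.take_of_length_le; omega
  rw [h2, h1, hlen]
  have h3 : B.length - (B.length - i) = i := by omega
  rw [h3]

-- ===== VERDICT (by name: the statement is the Claim_ definition above) =====
theorem solution_spec : Claim_equal_solution := by
  unfold Claim_equal_solution Spec_solution
  intro A B _ hpre
  by_cases hAB : A = B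
  · subst hAB
    simp [solution, solution_alt, solGo]
  · have hL : A.toList ≠ B.toList := fun h => hAB (String.toList_inj.mp h)
    have hAnil : A.toList ≠ [] := by
      have : A ≠ "" := fun h => hAB (by rw [h, hpre h])
      simp [this]
    by_cases hlen : A.length = B.length
    · -- equal lengths: compare with the first occurrence of A in B ++ B
      have hlenL : A.toList.length = B.toList.length := hlen
      have hn : 0 < B.toList.length := by
        cases hA' : A.toList with
        | nil => exact absurd hA' hAnil
        | cons c cs => rw [← hlenL, hA']; simp
      by_cases hk : 0 ≤ PySem.Chars.find (B.toList ++ B.toList) A.toList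
      · obtain ⟨hpref, hmin⟩ := PySem.Chars.find_spec hk
        have hkle : (PySem.Chars.find (B.toList ++ B.toList) A.toList).toNat ≤ B.toList.length := by
          have h1 := hpref.length_le
          have h2 : (List.drop (PySem.Chars.find (B.toList ++ B.toList) A.toList).toNat (B.toList ++ B.toList)).length = (B.toList ++ B.toList).length - (PySem.Chars.find (B.toList ++ B.toList) A.toList).toNat := by simp
          rw [h2] at h1
          simp only [List.length_append] at h1
          omega
        have hrot : A.toList = B.toList.rotate (PySem.Chars.find (B.toList ++ B.toList) A.toList).toNat :=
          (prefix_drop_iff_rotate _ _ hlenL _ hkle).mp hpref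
        have hminr : ∀ i : Nat, i < (PySem.Chars.find (B.toList ++ B.toList) A.toList).toNat → A.toList ≠ B.toList.rotate i := by
          intro i hi h
          exact hmin i hi ((prefix_drop_iff_rotate _ _ hlenL i (by omega)).mpr h)
        by_cases hk100 : PySem.Chars.find (B.toList ++ B.toList) A.toList < 100
        · have := solGo_some B.toList 99 A.toList (PySem.Chars.find (B.toList ++ B.toList) A.toList).toNat hAnil (by omega) (by omega) hrot hminr
          rw [solution]
          rw [show (100 : Nat) = 99 + 1 from rfl, show (0 : Int) = 99 - ((99 : Nat) : Int) by norm_num, this]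
          rw [solution_alt]
          rw [if_neg hAB, if_neg (by simp [hlen]), PySem.Str.find_eq]
          simp only [String.toList_append]
          rw [if_pos ⟨hk, hk100⟩]
          omega
        · have := solGo_none B.toList 99 A.toList hAnil (by omega) (by
            intro j hj h
            exact hminr j (by omega) h)
          rw [solution]
          rw [show (100 : Nat) = 99 + 1 from rfl, show (0 : Int) = 99 - ((99 : Nat) : Int) by norm_num, this]
          rw [solution_alt]
          rw [if_neg hAB, if_neg (by simp [hlen]), PySem.Str.find_eq]
          simp only [String.toList_append]
          rw [if_neg (by intro h; exact hk100 h.2)]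
      · -- no occurrence: A is no rotation of B at all
        have hnone : ∀ j : Nat, j < 100 → A.toList ≠ B.toList.rotate j := by
          intro j _ h
          apply hk
          rw [PySem.Chars.find_nonneg_iff]
          rw [← PySem.Chars.isIn_iff_infix, ← PySem.Chars.exists_prefix_drop_iff_isIn]
          refine ⟨j % B.toList.length, ?_⟩
          rw [prefix_drop_iff_rotate _ _ hlenL _ (le_of_lt (Nat.mod_lt _ hn))]
          rw [List.rotate_mod]
          exact h
        have := solGo_none B.toList 99 A.toList hAnil (by omega) (fun j hj => hnone j (by omega))
        rw [solution]
        rw [show (100 : Nat) = 99 + 1 from rfl, show (0 : Int) = 99 - ((99 : Nat) : Int) by norm_num, this]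
        rw [solution_alt]
        rw [if_neg hAB, if_neg (by simp [hlen]), PySem.Str.find_eq]
        simp only [String.toList_append]
        rw [if_neg (by intro h; exact hk h.1)]
    · -- different lengths: A is never a rotation of B
      have hnone : ∀ j : Nat, j < 100 → A.toList ≠ B.toList.rotate j := by
        intro j _ h
        apply hlen
        have : A.toList.length = (B.toList.rotate j).length := by rw [h]
        rw [List.length_rotate] at this
        exact this
      have := solGo_none B.toList 99 A.toList hAnil (by omega) (fun j hj => hnone j (by omega))
      rw [solution]
      rw [show (100 : Nat) = 99 + 1 from rfl, show (0 : Int) = 99 - ((99 : Nat) : Int) by norm_num, this]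
      rw [solution_alt]
      rw [if_neg hAB, if_pos (by simpa using hlen)]

@[simp] theorem solution_raises : Claim_raises_solution := by
  unfold Claim_raises_solution
  exact ⟨by intro A B _ hr hp; exact hr.2 (hp hr.1), by decide⟩
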